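-- pv_equiv track=rewrite | github.com/satyaaa55/Fullstack-Assessment-Submissions | hiren-chaudhary-ldrp/canBorrowAll.py | canBorrowAll
-- ===== SOURCE A (Python) =====
-- def canBorrowAll(copies, borrows):
--     events = []
--
--     for start, end in borrows:
--         events.append((start, 1))   # borrow book
--         events.append((end, -1))    # return book
--
--     # Sort events by time, return events processed first if same time
--     events.sort(key=lambda x: (x[0], x[1]))
--
--     current = 0
--
--     for time, change in events:
--         current += change
--         if current > copies:
--             return False
--
--     return True
-- ===== SOURCE B (Python) =====
-- def canBorrowAll(copies, borrows):
--     # For each borrow's start time, count borrows active at that instant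
--     # (started at or before it and not yet returned); all such counts must
--     # stay within the number of copies.
--     for s, _e in borrows:
--         active = 0
--         for s2, e2 in borrows:
--             if s2 <= s:
--                 active += 1
--             if e2 <= s:
--                 active -= 1
--         if active > copies:
--             return False
--     return True
-- ===== Notes on version B (the rewrite author's own statement) =====
-- stated objective: alternative
-- what changed: Replaces A's build-event-list, sort, and running-sum sweep by a direct per-start overlap count: for each borrow's start time, one pass over borrows counts those started at or before it minus those already returned, with no event list and no sort.
import Mathlib
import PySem

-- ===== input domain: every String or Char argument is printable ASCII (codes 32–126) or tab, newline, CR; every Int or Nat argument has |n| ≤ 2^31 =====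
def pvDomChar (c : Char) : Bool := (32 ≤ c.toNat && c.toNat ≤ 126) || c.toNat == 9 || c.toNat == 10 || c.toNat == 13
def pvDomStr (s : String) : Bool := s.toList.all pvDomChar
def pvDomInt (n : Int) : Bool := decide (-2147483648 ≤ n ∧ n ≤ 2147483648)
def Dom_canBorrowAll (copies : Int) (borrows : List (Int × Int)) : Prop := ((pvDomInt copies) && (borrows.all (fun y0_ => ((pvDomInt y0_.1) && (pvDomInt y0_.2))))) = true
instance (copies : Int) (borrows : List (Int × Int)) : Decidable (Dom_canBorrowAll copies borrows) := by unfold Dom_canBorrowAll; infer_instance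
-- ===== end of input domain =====

-- B replaces A's build-event-list, sort and running-sum sweep by a direct per-start
-- overlap count; objective: alternative (no sort, no event list; O(n^2) vs O(n log n)).

-- ===== PORT A =====
-- the events.append loop
def pvEvents (borrows : List (Int × Int)) : List (Int × Int) :=
  borrows.foldl (fun acc p => acc ++ [(p.1, 1), (p.2, -1)]) []

-- 'for time, change in events: current += change; if current > copies: return False'
def pvLoopA (copies : Int) : List (Int × Int) → Int → Bool
  | [], _ => true
  | (_, change) :: rest, current =>
      let current' := current + change
      if current' > copies then false else pvLoopA copies rest current'

def canBorrowAll (copies : Int) (borrows : List (Int × Int)) : Bool :=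
  pvLoopA copies (PySem.List.sorted2 (pvEvents borrows) Prod.fst Prod.snd) 0

-- ===== PORT B =====
-- inner 'for s2, e2 in borrows' loop accumulating active
def pvActive (s : Int) : List (Int × Int) → Int → Int
  | [], active => active
  | (s2, e2) :: rest, active =>
      pvActive s rest ((active + (if s2 ≤ s then 1 else 0)) + (if e2 ≤ s then -1 else 0))

-- outer 'for s, _e in borrows' loop with early False
def pvLoopB (copies : Int) (borrows : List (Int × Int)) : List (Int × Int) → Bool
  | [] => true
  | (s, _) :: rest =>
      if pvActive s borrows 0 > copies then false else pvLoopB copies borrows rest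

def canBorrowAll_alt (copies : Int) (borrows : List (Int × Int)) : Bool :=
  pvLoopB copies borrows borrows

-- ===== PRECONDITION & SPEC =====
def Spec_canBorrowAll (copies : Int) (borrows : List (Int × Int)) (out : Bool) : Prop := out = canBorrowAll_alt copies borrows
instance (copies : Int) (borrows : List (Int × Int)) (out : Bool) : Decidable (Spec_canBorrowAll copies borrows out) := by unfold Spec_canBorrowAll; infer_instance

-- ===== CLAIM (what is proved, stated in full; the proofs are below) =====
def Claim_equal_canBorrowAll : Prop := ∀ (copies : Int) (borrows : List (Int × Int)), Dom_canBorrowAll copies borrows → Spec_canBorrowAll copies borrows (canBorrowAll copies borrows)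

-- ===== LEMMAS AND PROOFS =====

-- the lexicographic order Python's sort key (x[0], x[1]) produces
def evLE (a b : Int × Int) : Prop := a.1 < b.1 ∨ (a.1 = b.1 ∧ a.2 ≤ b.2)

-- counts of starts / ends ≤ t among the borrows
def nS (b : List (Int × Int)) (t : Int) : Nat := b.countP (fun p => decide (p.1 ≤ t))
def nE (b : List (Int × Int)) (t : Int) : Nat := b.countP (fun p => decide (p.2 ≤ t))

-- event-counting predicates
def cP (t : Int) (x : Int × Int) : Bool := decide (x.2 = 1) && decide (x.1 ≤ t)
def cM (t : Int) (x : Int × Int) : Bool := decide (x.2 = -1) && decide (x.1 ≤ t)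

def pvSum (l : List (Int × Int)) : Int := (l.map Prod.snd).sum

lemma pvSum_nil : pvSum [] = 0 := rfl

lemma pvSum_cons (x : Int × Int) (l : List (Int × Int)) : pvSum (x :: l) = x.2 + pvSum l := by
  simp [pvSum]

lemma pvSum_append (l₁ l₂ : List (Int × Int)) : pvSum (l₁ ++ l₂) = pvSum l₁ + pvSum l₂ := by
  simp [pvSum]

lemma pvEvents_eq_flatMap (b : List (Int × Int)) :
    pvEvents b = b.flatMap (fun p => [(p.1, 1), (p.2, -1)]) :=
  PySem.List.foldl_append_eq_flatMap _ b []

lemma pvEvents_cons (p : Int × Int) (b : List (Int × Int)) :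
    pvEvents (p :: b) = (p.1, 1) :: (p.2, -1) :: pvEvents b := by
  simp [pvEvents_eq_flatMap, List.flatMap_cons]

lemma mem_pvEvents {x : Int × Int} {b : List (Int × Int)} (hx : x ∈ pvEvents b) :
    (∃ q ∈ b, x = (q.1, 1)) ∨ (∃ q ∈ b, x = (q.2, -1)) := by
  induction b with
  | nil => simp [pvEvents] at hx
  | cons p b ih =>
      rw [pvEvents_cons] at hx
      simp only [List.mem_cons] at hx
      rcases hx with h | h | h
      · exact Or.inl ⟨p, by simp, h⟩
      · exact Or.inr ⟨p, by simp, h⟩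
      · rcases ih h with ⟨q, hq, hxe⟩ | ⟨q, hq, hxe⟩
        · exact Or.inl ⟨q, by simp [hq], hxe⟩
        · exact Or.inr ⟨q, by simp [hq], hxe⟩

-- sorted-by-(fst,snd) produces an evLE-pairwise list
lemma pairwise_insertBy (x : Int × Int) (l : List (Int × Int)) (hl : l.Pairwise evLE) :
    (PySem.List.insertBy (fun a b => decide (a.1 < b.1) || (!decide (b.1 < a.1) && decide (a.2 < b.2))) x l).Pairwise evLE := by
  induction l with
  | nil => simp [PySem.List.insertBy, evLE]
  | cons y ys ih =>
      rw [List.pairwise_cons] at hl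
      by_cases h : (decide (x.1 < y.1) || (!decide (y.1 < x.1) && decide (x.2 < y.2))) = true
      · rw [PySem.List.insertBy, if_pos h]
        simp only [Bool.or_eq_true, Bool.and_eq_true, Bool.not_eq_true', decide_eq_true_eq,
          decide_eq_false_iff_not] at h
        refine List.pairwise_cons.2 ⟨?_, List.pairwise_cons.2 ⟨hl.1, hl.2⟩⟩
        intro z hz
        simp only [List.mem_cons] at hz
        rcases hz with rfl | hz
        · unfold evLE; omega
        · have := hl.1 z hz
          unfold evLE at this ⊢; omega
      · rw [PySem.List.insertBy, if_neg h]
        simp only [Bool.or_eq_true, Bool.and_eq_true, Bool.not_eq_true', decide_eq_true_eq,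
          decide_eq_false_iff_not] at h
        push_neg at h
        refine List.pairwise_cons.2 ⟨?_, ih hl.2⟩
        intro z hz
        rcases (PySem.List.mem_insertBy _ x z ys).1 hz with rfl | hz
        · unfold evLE; omega
        · exact hl.1 z hz

lemma pairwise_sorted2 (xs : List (Int × Int)) :
    (PySem.List.sorted2 xs Prod.fst Prod.snd).Pairwise evLE := by
  show (xs.foldl (fun acc x => PySem.List.insertBy
      (fun a b => decide (a.1 < b.1) || (!decide (b.1 < a.1) && decide (a.2 < b.2))) x acc) []).Pairwise evLE
  have H : ∀ (l acc : List (Int × Int)), acc.Pairwise evLE →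
      (l.foldl (fun acc x => PySem.List.insertBy
        (fun a b => decide (a.1 < b.1) || (!decide (b.1 < a.1) && decide (a.2 < b.2))) x acc) acc).Pairwise evLE := by
    intro l
    induction l with
    | nil => intro acc h; simpa using h
    | cons x l ih => intro acc h; exact ih _ (pairwise_insertBy x acc h)
  exact H xs [] (by simp)

-- characterisation of A's early-return sweep
lemma loopA_iff (copies : Int) (l : List (Int × Int)) (cur : Int) :
    pvLoopA copies l cur = true ↔ ∀ p, p <+: l → p ≠ [] → cur + pvSum p ≤ copies := by
  induction l generalizing cur with
  | nil =>
      simp only [pvLoopA, true_iff]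
      intro p hp hne
      exact absurd (List.prefix_nil.1 hp) hne
  | cons x rest ih =>
      obtain ⟨t, c⟩ := x
      simp only [pvLoopA]
      by_cases h : cur + c > copies
      · rw [if_pos (by exact h)]
        refine iff_of_false (by simp) ?_
        intro H
        have := H [(t, c)] ⟨rest, rfl⟩ (by simp)
        rw [pvSum_cons, pvSum_nil] at this
        simp at this
        omega
      · rw [if_neg (by exact h), ih]
        constructor
        · intro H p hp hne
          rcases List.prefix_cons_iff.1 hp with rfl | ⟨q, rfl, hq⟩
          · exact absurd rfl hne
          · rw [pvSum_cons]
            rcases eq_or_ne q [] with rfl | hqne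
            · rw [pvSum_nil]; simpa using by omega
            · have := H q hq hqne
              simp only at this ⊢; omega
        · intro H q hq hqne
          have := H ((t, c) :: q) (List.prefix_cons_iff.2 (Or.inr ⟨q, rfl, hq⟩)) (by simp)
          rw [pvSum_cons] at this
          simp only at this ⊢; omega

-- B's inner loop computes the overlap count
lemma pvActive_eq (s : Int) (l : List (Int × Int)) (acc : Int) :
    pvActive s l acc = acc + (nS l s : Int) - (nE l s : Int) := by
  induction l generalizing acc with
  | nil => simp [pvActive, nS, nE]
  | cons p rest ih =>
      obtain ⟨s2, e2⟩ := p
      simp only [pvActive, nS, nE, List.countP_cons] at *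
      rw [ih]
      split_ifs <;> simp_all <;> omega

-- characterisation of B's outer loop
lemma loopB_iff (copies : Int) (b l : List (Int × Int)) :
    pvLoopB copies b l = true ↔ ∀ q ∈ l, (nS b q.1 : Int) - (nE b q.1 : Int) ≤ copies := by
  induction l with
  | nil => simp [pvLoopB]
  | cons p rest ih =>
      obtain ⟨s, e⟩ := p
      simp only [pvLoopB]
      by_cases h : pvActive s b 0 > copies
      · rw [if_pos (by exact h)]
        rw [pvActive_eq] at h
        refine iff_of_false (by simp) ?_
        intro H
        have := H (s, e) (by simp)
        simp only at this
        omega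
      · rw [if_neg (by exact h), ih]
        rw [pvActive_eq] at h
        constructor
        · intro H q hq
          simp only [List.mem_cons] at hq
          rcases hq with rfl | hq
          · simp only; omega
          · exact H q hq
        · intro H q hq; exact H q (by simp [hq])

-- counting events with second component 1 (resp. -1) and time ≤ t
lemma countP_events_one (b : List (Int × Int)) (t : Int) :
    (pvEvents b).countP (cP t) = nS b t := by
  induction b with
  | nil => simp [pvEvents, nS]
  | cons p b ih =>
      rw [pvEvents_cons]
      simp only [List.countP_cons, nS, List.countP_cons] at *
      rw [ih]
      simp only [cP]
      by_cases h : p.1 ≤ t <;> simp [h]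

lemma countP_events_neg (b : List (Int × Int)) (t : Int) :
    (pvEvents b).countP (cM t) = nE b t := by
  induction b with
  | nil => simp [pvEvents, nE]
  | cons p b ih =>
      rw [pvEvents_cons]
      simp only [List.countP_cons, nE, List.countP_cons] at *
      rw [ih]
      simp only [cM]
      by_cases h : p.2 ≤ t <;> simp [h]

-- any list of ±1-events whose times are all ≤ t sums to its (#+1) − (#−1)
lemma pvSum_eq_counts (t : Int) (l : List (Int × Int))
    (h1 : ∀ x ∈ l, x.2 = 1 ∨ x.2 = -1) (h2 : ∀ x ∈ l, x.1 ≤ t) :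
    pvSum l = (l.countP (cP t) : Int) - (l.countP (cM t) : Int) := by
  induction l with
  | nil => simp [pvSum]
  | cons x l ih =>
      have hx1 := h1 x (by simp)
      have hx2 := h2 x (by simp)
      have ihl := ih (fun y hy => h1 y (by simp [hy])) (fun y hy => h2 y (by simp [hy]))
      rw [pvSum_cons, ihl, List.countP_cons, List.countP_cons]
      rcases hx1 with h | h <;> simp [cP, cM, h, hx2] <;> omega

lemma exists_max_fst (b : List (Int × Int)) (hb : b ≠ []) :
    ∃ q ∈ b, ∀ r ∈ b, r.1 ≤ q.1 := by
  induction b with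
  | nil => exact absurd rfl hb
  | cons p b ih =>
      rcases eq_or_ne b [] with rfl | hbne
      · exact ⟨p, by simp, by simp⟩
      · obtain ⟨q, hq, hmax⟩ := ih hbne
        by_cases h : p.1 ≤ q.1
        · refine ⟨q, by simp [hq], ?_⟩
          intro r hr
          simp only [List.mem_cons] at hr
          rcases hr with rfl | hr
          · exact h
          · exact hmax r hr
        · refine ⟨p, by simp, ?_⟩
          intro r hr
          simp only [List.mem_cons] at hr
          rcases hr with rfl | hr
          · exact le_refl _
          · exact le_trans (hmax r hr) (by omega)

lemma sorted_elems_pm1 {b : List (Int × Int)} {x : Int × Int}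
    (hx : x ∈ PySem.List.sorted2 (pvEvents b) Prod.fst Prod.snd) : x.2 = 1 ∨ x.2 = -1 := by
  have hmem : x ∈ pvEvents b := (PySem.List.sorted2_perm _ _ _ _).mem_iff.1 hx
  rcases mem_pvEvents hmem with ⟨q, _, rfl⟩ | ⟨q, _, rfl⟩ <;> simp

-- on an evLE-pairwise list, takeWhile (time ≤ t) is filter (time ≤ t)
lemma takeWhile_eq_filter_le (t : Int) (S : List (Int × Int)) (hpw : S.Pairwise evLE) :
    S.takeWhile (fun x => decide (x.1 ≤ t)) = S.filter (fun x => decide (x.1 ≤ t)) := by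
  induction S with
  | nil => simp
  | cons y ys ih =>
      rw [List.pairwise_cons] at hpw
      by_cases hy : y.1 ≤ t
      · rw [List.takeWhile_cons_of_pos (by simpa using hy),
          List.filter_cons_of_pos (by simpa using hy), ih hpw.2]
      · rw [List.takeWhile_cons_of_neg (by simpa using hy),
          List.filter_cons_of_neg (by simpa using hy)]
        symm
        rw [List.filter_eq_nil_iff]
        intro z hz
        have := hpw.1 z hz
        unfold evLE at this
        simp only [decide_eq_true_eq]
        omega

-- the heart of the equivalence: some prefix of the sorted sweep exceeds copies
-- iff at some borrow's start time the overlap count exceeds copies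
lemma exceed_iff (copies : Int) (b : List (Int × Int)) :
    (∃ p, p <+: PySem.List.sorted2 (pvEvents b) Prod.fst Prod.snd ∧ p ≠ [] ∧ copies < pvSum p) ↔
    (∃ q ∈ b, copies < (nS b q.1 : Int) - (nE b q.1 : Int)) := by
  have hperm : (PySem.List.sorted2 (pvEvents b) Prod.fst Prod.snd).Perm (pvEvents b) :=
    PySem.List.sorted2_perm _ _ _ _
  have hpw : (PySem.List.sorted2 (pvEvents b) Prod.fst Prod.snd).Pairwise evLE :=
    pairwise_sorted2 _
  set S := PySem.List.sorted2 (pvEvents b) Prod.fst Prod.snd with hS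
  constructor
  · rintro ⟨p, hp, hpne, hpsum⟩
    induction p using List.reverseRecOn with
    | nil => exact absurd rfl hpne
    | append_singleton q x ihq =>
        have hqpre : q <+: S := (List.prefix_append q [x]).trans hp
        have hpwp : (q ++ [x]).Pairwise evLE := List.Pairwise.sublist hp.sublist hpw
        have hxmem : x ∈ S := hp.sublist.mem (by simp)
        rcases sorted_elems_pm1 (hS ▸ hxmem) with hx1 | hx1
        · -- last event of the prefix is a borrow at time t := x.1
          set t := x.1 with ht
          have hall_le : ∀ y ∈ q ++ [x], y.1 ≤ t := by
            intro y hy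
            rcases List.mem_append.1 hy with hy | hy
            · have := (List.pairwise_append.1 hpwp).2.2 y hy x (by simp)
              unfold evLE at this; omega
            · have : y = x := by simpa using hy
              rw [this]
          have hallpm : ∀ y ∈ q ++ [x], y.2 = 1 ∨ y.2 = -1 := by
            intro y hy; exact sorted_elems_pm1 (hS ▸ hp.sublist.mem hy)
          obtain ⟨rest, hrest⟩ := hp
          have hpwS : ((q ++ [x]) ++ rest).Pairwise evLE := by rw [hrest]; exact hpw
          -- no return event with time ≤ t can follow the prefix
          have hrest_none : rest.countP (cM t) = 0 := by
            rw [List.countP_eq_zero]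
            intro y hy
            have hxy : evLE x y :=
              (List.pairwise_append.1 hpwS).2.2 x (by simp) y hy
            unfold evLE at hxy
            simp only [cM, Bool.and_eq_true, decide_eq_true_eq, not_and]
            intro hy1
            omega
          have hsum := pvSum_eq_counts t (q ++ [x]) hallpm hall_le
          have hc1 : (q ++ [x]).countP (cP t) ≤ nS b t := by
            calc (q ++ [x]).countP (cP t)
                ≤ S.countP (cP t) := (List.IsPrefix.sublist ⟨rest, hrest⟩).countP_le
              _ = nS b t := by rw [hperm.countP_eq]; exact countP_events_one b t
          have hcm : nE b t ≤ (q ++ [x]).countP (cM t) := by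
            have h1 : S.countP (cM t) = (q ++ [x]).countP (cM t) := by
              rw [← hrest, List.countP_append, hrest_none]; omega
            have h2 : S.countP (cM t) = nE b t := by
              rw [hperm.countP_eq]; exact countP_events_neg b t
            omega
          have hx_ev : x ∈ pvEvents b := hperm.mem_iff.1 hxmem
          rcases mem_pvEvents hx_ev with ⟨q0, hq0, hxeq⟩ | ⟨q0, hq0, hxeq⟩
          · refine ⟨q0, hq0, ?_⟩
            have hq01 : q0.1 = t := by rw [hxeq] at ht; simp [ht]
            rw [hq01]
            omega
          · exfalso; rw [hxeq] at hx1; simp at hx1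
        · -- last event is a return: drop it (sum grows), or p is a single return
          rcases eq_or_ne q [] with rfl | hqne
          · have hxmem' : x ∈ pvEvents b := hperm.mem_iff.1 hxmem
            have hbne : b ≠ [] := by
              rintro rfl; simp [pvEvents] at hxmem'
            obtain ⟨qm, hqm, hmax⟩ := exists_max_fst b hbne
            refine ⟨qm, hqm, ?_⟩
            have hnS : nS b qm.1 = b.length := by
              rw [nS, List.countP_eq_length]
              intro r hr; simpa using hmax r hr
            have hnE : nE b qm.1 ≤ b.length := List.countP_le_length
            have hone : pvSum ([] ++ [x]) = -1 := by
              rw [List.nil_append, pvSum_cons, pvSum_nil, hx1]; ring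
            rw [hone] at hpsum
            omega
          · have hsq : pvSum q = pvSum (q ++ [x]) + 1 := by
              rw [pvSum_append, pvSum_cons, pvSum_nil, hx1]; ring
            exact ihq hqpre hqne (by omega)
  · rintro ⟨q, hq, hlt⟩
    set t := q.1 with ht
    have htw := takeWhile_eq_filter_le t S hpw
    refine ⟨S.takeWhile (fun x => decide (x.1 ≤ t)), List.takeWhile_prefix _, ?_, ?_⟩
    · -- (t,1) is an event with time ≤ t, so the prefix is nonempty
      have h1 : (t, 1) ∈ S := hperm.mem_iff.2 (by
        rw [pvEvents_eq_flatMap]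
        exact List.mem_flatMap.2 ⟨q, hq, by simp [ht]⟩)
      intro hnil
      rw [htw, List.filter_eq_nil_iff] at hnil
      exact hnil (t, 1) h1 (by simp)
    · -- its sum is exactly nS − nE at t, which exceeds copies
      rw [htw]
      have hFpm : ∀ x ∈ S.filter (fun x => decide (x.1 ≤ t)), x.2 = 1 ∨ x.2 = -1 := by
        intro x hx; exact sorted_elems_pm1 (hS ▸ (List.mem_of_mem_filter hx))
      have hFle : ∀ x ∈ S.filter (fun x => decide (x.1 ≤ t)), x.1 ≤ t := by
        intro x hx
        have := List.of_mem_filter hx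
        simpa using this
      rw [pvSum_eq_counts t _ hFpm hFle]
      have hc1 : (S.filter (fun x => decide (x.1 ≤ t))).countP (cP t) = nS b t := by
        rw [List.countP_filter, ← countP_events_one b t, ← hperm.countP_eq]
        apply List.countP_congr
        intro x _
        simp only [cP, Bool.and_eq_true, decide_eq_true_eq]
        tauto
      have hcm : (S.filter (fun x => decide (x.1 ≤ t))).countP (cM t) = nE b t := by
        rw [List.countP_filter, ← countP_events_neg b t, ← hperm.countP_eq]
        apply List.countP_congr
        intro x _
        simp only [cM, Bool.and_eq_true, decide_eq_true_eq]
        tauto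
      rw [hc1, hcm]
      omega

-- ===== VERDICT (by name: the statement is the Claim_ definition above) =====
theorem canBorrowAll_spec : Claim_equal_canBorrowAll := by
  intro copies borrows _
  show canBorrowAll copies borrows = canBorrowAll_alt copies borrows
  rw [Bool.eq_iff_iff, canBorrowAll, canBorrowAll_alt, loopA_iff, loopB_iff]
  constructor
  · intro hA q hq
    by_contra hcon
    obtain ⟨p, hp, hpne, hps⟩ := (exceed_iff copies borrows).2 ⟨q, hq, by omega⟩
    have := hA p hp hpne
    omega
  · intro hB p hp hpne
    by_contra hcon
    obtain ⟨q, hq, hqs⟩ := (exceed_iff copies borrows).1 ⟨p, hp, hpne, by omega⟩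
    have := hB q hq
    omega
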